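-- pv_equiv track=rewrite | github.com/tellewsen/CardGames | titusen/get_max_points.py | collect_points
-- ===== SOURCE A (Python) =====
-- import collections
--
-- POINTS: dict[tuple[int, ...], tuple[int, int]] = {
--     # (Dice #, count): (score, # used die)
--     (1, 1): (100, 1),
--     (1, 2): (200, 2),
--     (1, 3): (1000, 3),
--     (1, 4): (2000, 4),
--     (1, 5): (4000, 5),
--     (1, 6): (8000, 6),
--     (2, 3): (200, 3),
--     (2, 4): (400, 4),
--     (2, 5): (800, 5),
--     (2, 6): (1600, 6),
--     (3, 3): (300, 3),
--     (3, 4): (600, 4),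
--     (3, 5): (1200, 5),
--     (3, 6): (2400, 6),
--     (4, 3): (400, 3),
--     (4, 4): (800, 4),
--     (4, 5): (1600, 5),
--     (4, 6): (3200, 6),
--     (5, 1): (50, 1),
--     (5, 2): (100, 2),
--     (5, 3): (500, 3),
--     (5, 4): (1000, 4),
--     (5, 5): (2000, 5),
--     (5, 6): (4000, 6),
--     (6, 3): (600, 3),
--     (6, 4): (1200, 4),
--     (6, 5): (2400, 5),
--     (6, 6): (4800, 6),
-- }
--
-- def is_three_pairs(die: tuple[int, ...]) -> bool:
--     """Check if we got three pairs"""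
--     counts = collections.Counter(die)
--     if len(counts.keys()) != 3:
--         return False
--     for v in counts.values():
--         if v != 2:
--             return False
--     return True
--
-- def is_straight(die: tuple[int, ...]) -> bool:
--     """Check if we got straight"""
--     return die == (1, 2, 3, 4, 5, 6)
--
-- def collect_points(die: tuple[int, ...]) -> tuple[int, int]:
--     """Figure out how many points we got from this set of die"""
--     points = 0
--     used_die = 0
--     if len(die) == 6:
--         if is_three_pairs(die):
--             return 1500, 6
--         if is_straight(die):
--             return 2000, 6
--     for i in (1, 2, 3, 4, 5, 6):
--         count = die.count(i)
--         result = POINTS.get((i, count))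
--         if result:
--             points += result[0]
--             used_die += result[1]
--     return points, used_die
-- ===== SOURCE B (Python) =====
-- def _score(face, n):
--     """Total (points, used dice) a face contributes at multiplicity n (0 beyond six of a kind)."""
--     if n < 1 or n > 6 or not 1 <= face <= 6:
--         return 0, 0
--     if face == 1:
--         return (100 * n, n) if n < 3 else (1000 << (n - 3), n)
--     if face == 5:
--         return (50 * n, n) if n < 3 else (500 << (n - 3), n)
--     return (0, 0) if n < 3 else (face * 100 << (n - 3), n)
--
-- def collect_points(die):
--     """Figure out how many points we got from this set of die"""
--     cnt = {}
--     points = 0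
--     used = 0
--     for d in die:
--         c = cnt.get(d, 0)
--         cnt[d] = c + 1
--         p0, u0 = _score(d, c)
--         p1, u1 = _score(d, c + 1)
--         points += p1 - p0
--         used += u1 - u0
--     if len(die) == 6:
--         if sorted(cnt.values()) == [2, 2, 2]:
--             return 1500, 6
--         if tuple(die) == (1, 2, 3, 4, 5, 6):
--             return 2000, 6
--     return points, used
-- ===== Notes on version B (the rewrite author's own statement) =====
-- stated objective: alternative
-- what changed: B drops A's loop over the six faces with its 28-entry POINTS table: it makes a single pass over the dice themselves, scoring incrementally (each die adds the closed-form marginal value score(face, c+1) - score(face, c) for its face's running count c), and checks three pairs by comparing the sorted multiplicity list against three twos instead of key/value inspection.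
import Mathlib
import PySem

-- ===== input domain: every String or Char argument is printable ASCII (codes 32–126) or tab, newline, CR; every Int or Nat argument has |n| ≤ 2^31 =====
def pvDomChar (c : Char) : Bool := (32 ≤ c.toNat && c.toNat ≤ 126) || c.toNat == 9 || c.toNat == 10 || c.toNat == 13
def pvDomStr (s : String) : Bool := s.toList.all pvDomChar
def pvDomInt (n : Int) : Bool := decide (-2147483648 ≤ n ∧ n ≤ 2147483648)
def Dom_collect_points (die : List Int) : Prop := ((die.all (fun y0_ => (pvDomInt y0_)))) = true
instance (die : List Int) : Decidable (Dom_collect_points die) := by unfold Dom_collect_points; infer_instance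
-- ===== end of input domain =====

-- B replaces A's loop over the six faces with its 28-entry POINTS table by a single
-- incremental pass over the dice themselves (each die adds the closed-form marginal
-- score for its face) and a sorted-counts three-pairs check (objective: alternative).

-- ===== PORT A =====
def POINTS : PySem.Dict (Int × Int) (Int × Int) := PySem.Dict.mk
  [((1, 1), (100, 1)), ((1, 2), (200, 2)), ((1, 3), (1000, 3)), ((1, 4), (2000, 4)),
   ((1, 5), (4000, 5)), ((1, 6), (8000, 6)),
   ((2, 3), (200, 3)), ((2, 4), (400, 4)), ((2, 5), (800, 5)), ((2, 6), (1600, 6)),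
   ((3, 3), (300, 3)), ((3, 4), (600, 4)), ((3, 5), (1200, 5)), ((3, 6), (2400, 6)),
   ((4, 3), (400, 3)), ((4, 4), (800, 4)), ((4, 5), (1600, 5)), ((4, 6), (3200, 6)),
   ((5, 1), (50, 1)), ((5, 2), (100, 2)), ((5, 3), (500, 3)), ((5, 4), (1000, 4)),
   ((5, 5), (2000, 5)), ((5, 6), (4000, 6)),
   ((6, 3), (600, 3)), ((6, 4), (1200, 4)), ((6, 5), (2400, 5)), ((6, 6), (4800, 6))]

def is_three_pairs (die : List Int) : Bool :=
  let counts := PySem.Dict.counter die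
  if counts.keys.length ≠ 3 then false
  else counts.values.all (fun v => v == 2)

def is_straight (die : List Int) : Bool :=
  die == [1, 2, 3, 4, 5, 6]

-- the body of A's 'for i in (1,…,6)' loop
def astep (die : List Int) (s : Int × Int) (i : Int) : Int × Int :=
  let count : Int := (die.count i : Int)
  match POINTS.get? (i, count) with
  | some result => (s.1 + result.1, s.2 + result.2)
  | none => s

def collect_points_loop (die : List Int) : Int × Int :=
  ([1, 2, 3, 4, 5, 6] : List Int).foldl (astep die) (0, 0)

def collect_points (die : List Int) : Int × Int :=
  if die.length = 6 then
    if is_three_pairs die then (1500, 6)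
    else if is_straight die then (2000, 6)
    else collect_points_loop die
  else collect_points_loop die

-- ===== PORT B =====
-- _score in Source B: total (points, used) a face contributes at multiplicity n
def score (face : Int) (n : Int) : Int × Int :=
  if n < 1 ∨ n > 6 ∨ ¬(1 ≤ face ∧ face ≤ 6) then (0, 0)
  else if face = 1 then
    (if n < 3 then (100 * n, n) else (1000 <<< (n - 3).toNat, n))
  else if face = 5 then
    (if n < 3 then (50 * n, n) else (500 <<< (n - 3).toNat, n))
  else
    (if n < 3 then (0, 0) else (face * 100 <<< (n - 3).toNat, n))

-- the body of Source B's 'for d in die' loop: state = (cnt, points, used)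
def bstep (s : PySem.Dict Int Int × Int × Int) (d : Int) : PySem.Dict Int Int × Int × Int :=
  let c := s.1.getD d 0
  let cnt := s.1.insert d (c + 1)
  let p0 := score d c
  let p1 := score d (c + 1)
  (cnt, s.2.1 + (p1.1 - p0.1), s.2.2 + (p1.2 - p0.2))

def collect_points_alt (die : List Int) : Int × Int :=
  let st := die.foldl bstep (PySem.Dict.empty, 0, 0)
  if die.length = 6 then
    if PySem.List.sorted st.1.values (fun x => x) false = [2, 2, 2] then (1500, 6)
    else if die == [1, 2, 3, 4, 5, 6] then (2000, 6)
    else (st.2.1, st.2.2)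
  else (st.2.1, st.2.2)

-- ===== PRECONDITION & SPEC =====
def Spec_collect_points (die : List Int) (out : Int × Int) : Prop := out = collect_points_alt die
instance (die : List Int) (out : Int × Int) : Decidable (Spec_collect_points die out) := by unfold Spec_collect_points; infer_instance

-- ===== CLAIM (what is proved, stated in full; the proofs are below) =====
def Claim_equal_collect_points : Prop := ∀ (die : List Int), Dom_collect_points die → Spec_collect_points die (collect_points die)

-- ===== LEMMAS AND PROOFS =====

-- the per-face totals both programs compute
def totals (l : List Int) : Int × Int :=
  ((score 1 (l.count 1)).1 + (score 2 (l.count 2)).1 + (score 3 (l.count 3)).1 +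
   (score 4 (l.count 4)).1 + (score 5 (l.count 5)).1 + (score 6 (l.count 6)).1,
   (score 1 (l.count 1)).2 + (score 2 (l.count 2)).2 + (score 3 (l.count 3)).2 +
   (score 4 (l.count 4)).2 + (score 5 (l.count 5)).2 + (score 6 (l.count 6)).2)

theorem score_out (f n : Int) (h : ¬(1 ≤ f ∧ f ≤ 6)) : score f n = (0, 0) := by
  simp [score, h]

theorem step_eq (die : List Int) (f : Int) (hf : f ∈ ([1, 2, 3, 4, 5, 6] : List Int)) (s : Int × Int) :
    astep die s f = (s.1 + (score f (die.count f)).1, s.2 + (score f (die.count f)).2) := by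
  unfold astep
  generalize die.count f = m
  fin_cases hf <;> by_cases hm : m ≤ 6
  all_goals try (interval_cases m <;>
    norm_num [POINTS, score, PySem.Dict.get?_mk_cons, PySem.Dict.get?, Int.shiftLeft_eq] <;> try decide)
  all_goals
    simp [POINTS, score, Prod.mk.injEq, PySem.Dict.get?,
      show (1 : Int) ≠ ((m : Int)) from by omega, show (2 : Int) ≠ ((m : Int)) from by omega,
      show (3 : Int) ≠ ((m : Int)) from by omega, show (4 : Int) ≠ ((m : Int)) from by omega,
      show (5 : Int) ≠ ((m : Int)) from by omega, show (6 : Int) ≠ ((m : Int)) from by omega,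
      show (6:Int) < ((m : Int)) from by omega]

theorem a_loop_eq_totals (die : List Int) : collect_points_loop die = totals die := by
  unfold collect_points_loop totals
  simp only [List.foldl_cons, List.foldl_nil]
  rw [step_eq die 1 (by decide), step_eq die 2 (by decide), step_eq die 3 (by decide),
      step_eq die 4 (by decide), step_eq die 5 (by decide), step_eq die 6 (by decide)]
  refine Prod.ext ?_ ?_ <;> simp

theorem count_append_singleton (l : List Int) (d f : Int) :
    ((l ++ [d]).count f : Int) = (l.count f : Int) + (if d = f then 1 else 0) := by
  by_cases h : d = f <;> simp [List.count_append, h]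

theorem totals_append (l : List Int) (d : Int) :
    totals (l ++ [d]) =
      ((totals l).1 + ((score d ((l.count d : Int) + 1)).1 - (score d (l.count d)).1),
       (totals l).2 + ((score d ((l.count d : Int) + 1)).2 - (score d (l.count d)).2)) := by
  unfold totals
  by_cases h : 1 ≤ d ∧ d ≤ 6
  · have hd : d = 1 ∨ d = 2 ∨ d = 3 ∨ d = 4 ∨ d = 5 ∨ d = 6 := by omega
    rcases hd with h1 | h1 | h1 | h1 | h1 | h1 <;> subst h1 <;>
      simp only [count_append_singleton] <;> norm_num <;> constructor <;> ring
  · simp only [count_append_singleton, score_out d _ h]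
    by_cases h1 : d = 1
    · exact absurd ⟨by omega, by omega⟩ (h1 ▸ h)
    all_goals simp [h1, show d ≠ 2 from by rintro rfl; omega, show d ≠ 3 from by rintro rfl; omega,
      show d ≠ 4 from by rintro rfl; omega, show d ≠ 5 from by rintro rfl; omega,
      show d ≠ 6 from by rintro rfl; omega]

theorem counter_snoc (pre : List Int) (d : Int) :
    PySem.Dict.counter (pre ++ [d])
      = (PySem.Dict.counter pre).insert d ((PySem.Dict.counter pre).getD d 0 + 1) := by
  rw [← PySem.Dict.foldl_insert_getD_add_one_eq_counter, List.foldl_append,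
      PySem.Dict.foldl_insert_getD_add_one_eq_counter]
  simp

theorem bfold (die : List Int) : ∀ (pre : List Int) (p u : Int),
    die.foldl bstep (PySem.Dict.counter pre, p, u)
      = (PySem.Dict.counter (pre ++ die),
         p + ((totals (pre ++ die)).1 - (totals pre).1),
         u + ((totals (pre ++ die)).2 - (totals pre).2)) := by
  induction die with
  | nil => intro pre p u; simp
  | cons d rest ih =>
    intro pre p u
    rw [List.foldl_cons]
    show rest.foldl bstep
        ((PySem.Dict.counter pre).insert d ((PySem.Dict.counter pre).getD d 0 + 1),
         p + ((score d ((PySem.Dict.counter pre).getD d 0 + 1)).1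
              - (score d ((PySem.Dict.counter pre).getD d 0)).1),
         u + ((score d ((PySem.Dict.counter pre).getD d 0 + 1)).2
              - (score d ((PySem.Dict.counter pre).getD d 0)).2)) = _
    rw [← counter_snoc, PySem.Dict.getD_counter, ih (pre ++ [d])]
    have ht := totals_append pre d
    have h1 := congrArg Prod.fst ht
    have h2 := congrArg Prod.snd ht
    simp only at h1 h2
    refine Prod.ext ?_ (Prod.ext ?_ ?_) <;> simp [h1, h2] <;> ring_nf

theorem totals_nil : totals [] = (0, 0) := by decide

theorem st_eq (die : List Int) :
    die.foldl bstep (PySem.Dict.empty, 0, 0)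
      = (PySem.Dict.counter die, (totals die).1, (totals die).2) := by
  have h0 : (PySem.Dict.empty : PySem.Dict Int Int) = PySem.Dict.counter [] := rfl
  rw [h0, bfold die [] 0 0]
  simp [totals_nil]

-- three-pairs: A's key/value test equals B's sorted-values test
theorem perm_222 (l : List Int) :
    l.Perm [2, 2, 2] ↔ l.length = 3 ∧ ∀ x ∈ l, x = (2 : Int) := by
  constructor
  · intro h
    refine ⟨by simpa using h.length_eq, fun x hx => ?_⟩
    have := h.mem_iff.mp hx; simpa using this
  · rintro ⟨hl, ha⟩
    match l, hl with
    | [a, b, c], _ =>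
      have := ha a (by simp); have := ha b (by simp); have := ha c (by simp)
      subst_vars; rfl

theorem sorted_222 (l : List Int) :
    (PySem.List.sorted l (fun x => x) false = [2, 2, 2])
      ↔ l.length = 3 ∧ ∀ x ∈ l, x = (2 : Int) := by
  rw [← perm_222]
  constructor
  · intro h
    have hp := PySem.List.sorted_perm (xs := l) (key := fun x => x) (rev := false)
    rw [h] at hp; exact hp.symm
  · intro h
    have he : PySem.List.sorted l (fun x => x) false
        = PySem.List.sorted ([2, 2, 2] : List Int) (fun x => x) false :=
      (PySem.List.sorted_id_eq_sorted_id_iff_perm l [2, 2, 2]).mpr h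
    rw [he]; rfl

theorem three_pairs_iff (die : List Int) :
    is_three_pairs die = true
      ↔ PySem.List.sorted (PySem.Dict.counter die).values (fun x => x) false = [2, 2, 2] := by
  rw [sorted_222]
  have hk : (PySem.Dict.counter die).keys.length = (PySem.Dict.counter die).values.length := by
    simp [PySem.Dict.keys, PySem.Dict.values]
  rw [show is_three_pairs die
        = (if (PySem.Dict.counter die).keys.length ≠ 3 then false
           else (PySem.Dict.counter die).values.all (fun v => v == 2)) from rfl]
  split_ifs with h
  · simp only [false_iff, not_and]
    intro h3; omega
  · simp only [List.all_eq_true, beq_iff_eq]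
    constructor
    · intro hv; exact ⟨by omega, hv⟩
    · exact fun ⟨_, hv⟩ => hv

-- ===== VERDICT (by name: the statement is the Claim_ definition above) =====
theorem collect_points_spec : Claim_equal_collect_points := by
  intro die _
  show collect_points die = collect_points_alt die
  unfold collect_points collect_points_alt is_straight
  simp only [st_eq, a_loop_eq_totals]
  by_cases h6 : die.length = 6
  · simp only [h6]
    by_cases htp : is_three_pairs die = true
    · have hs := (three_pairs_iff die).mp htp
      simp [htp, hs]
    · have hs : ¬ (PySem.List.sorted (PySem.Dict.counter die).values (fun x => x) false
          = [2, 2, 2]) := fun h => htp ((three_pairs_iff die).mpr h)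
      simp [htp, hs]
  · simp [h6]
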